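-- pv_equiv track=rewrite | github.com/tarsioonofrio/codility-challenge | task1/test1.py | solution_codility
-- ===== SOURCE A (Python) =====
-- from collections import Counter
--
-- def solution_codility(T):
--     n = len(T)
--     c = 0
--     counter = Counter(T)
--     single = {}
--     mary = {}
--     for k, v in counter.most_common():
--         if v > 1:
--             c += 1
--             mary[k] = 1
--         else:
--             single[k] = v
--         if c == n // 2:
--             break
--
--     for k, v in single.items():
--         mary[k] = 1
--         c += 1
--         if c == n // 2:
--             break
--     return len(mary)
-- ===== SOURCE B (Python) =====
-- def solution_codility(T):
--     return min(len(set(T)), len(T) // 2)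
-- ===== Notes on version B (the rewrite author's own statement) =====
-- stated objective: faster
-- what changed: Replaced the Counter/most_common sort and the two break-capped dict-filling loops by the closed form min(len(set(T)), len(T)//2), which is what the capped count computes.
-- intended difference: On one-element lists A returns 1 (its break-at-c==0 quirk still inserts the single element into mary) while B returns 0, the intended answer since only n//2 = 0 elements may be counted. — e.g. on solution_codility([5]): A returns 1, B returns 0
import Mathlib
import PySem

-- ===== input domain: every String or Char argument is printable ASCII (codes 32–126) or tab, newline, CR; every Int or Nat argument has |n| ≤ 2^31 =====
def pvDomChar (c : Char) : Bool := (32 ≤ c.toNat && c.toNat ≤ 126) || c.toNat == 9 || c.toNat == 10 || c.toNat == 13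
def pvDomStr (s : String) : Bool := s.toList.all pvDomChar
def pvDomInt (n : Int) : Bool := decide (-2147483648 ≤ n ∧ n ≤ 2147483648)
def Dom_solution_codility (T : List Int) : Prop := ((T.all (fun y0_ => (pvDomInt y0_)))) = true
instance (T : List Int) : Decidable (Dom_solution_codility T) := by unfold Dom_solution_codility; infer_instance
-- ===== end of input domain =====

-- B replaces A's Counter + most_common sort and two break-capped dict-filling loops by the
-- closed form min(len(set(T)), len(T)//2) (measured faster; on one-element lists A and B differ, see D_ below).

-- ===== PORT A =====
-- first for-loop of A, over counter.most_common(), with its break; state (c, single, mary)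
def pvLoop1 (h : Int) : List (Int × Int) → Int → PySem.Dict Int Int → PySem.Dict Int Int →
    (Int × PySem.Dict Int Int × PySem.Dict Int Int)
  | [], c, single, mary => (c, single, mary)
  | (k, v) :: rest, c, single, mary =>
    if v > 1 then
      if c + 1 = h then (c + 1, single, mary.insert k 1)
      else pvLoop1 h rest (c + 1) single (mary.insert k 1)
    else
      if c = h then (c, single.insert k v, mary)
      else pvLoop1 h rest c (single.insert k v) mary

def pvLoop2 (h : Int) : List (Int × Int) → Int → PySem.Dict Int Int → PySem.Dict Int Int
  | [], _, mary => mary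
  | (k, _v) :: rest, c, mary =>
    if c + 1 = h then mary.insert k 1
    else pvLoop2 h rest (c + 1) (mary.insert k 1)


def solution_codility (T : List Int) : Int :=
  let n : Int := (T.length : Int)
  let counter := PySem.Dict.counter T
  let mostCommon := PySem.List.sorted counter.items (fun kv => kv.2) true
  let st := pvLoop1 (PySem.Int.floordiv n 2) mostCommon 0 PySem.Dict.empty PySem.Dict.empty
  let mary := pvLoop2 (PySem.Int.floordiv n 2) st.2.1.items st.1 st.2.2
  (mary.size : Int)

-- ===== PORT B =====
def solution_codility_alt (T : List Int) : Int :=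
  min ((PySem.Set.ofList T).length : Int) (PySem.Int.floordiv (T.length : Int) 2)

-- ===== PRECONDITION & SPEC =====
-- On one-element lists A returns 1 (its break at c == 0 == n//2 still leaves the lone element to be
-- inserted into mary by the second loop) while B returns 0, the intended answer since only n//2 = 0
-- elements may be counted.
def D_solution_codility (T : List Int) : Prop := T.length = 1
instance (T : List Int) : Decidable (D_solution_codility T) := by unfold D_solution_codility; infer_instance

def Spec_solution_codility (T : List Int) (out : Int) : Prop := ¬ D_solution_codility T → out = solution_codility_alt T
instance (T : List Int) (out : Int) : Decidable (Spec_solution_codility T out) := by unfold Spec_solution_codility; infer_instance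

def pvDiffWitness_solution_codility : List Int := [5]
def pvDiffWitnessOut_solution_codility : Int × Int := (1, 0)

-- ===== CLAIM (what is proved, stated in full; the proofs are below) =====
def Claim_unchanged_solution_codility : Prop := ∀ (T : List Int), Dom_solution_codility T → Spec_solution_codility T (solution_codility T)
def Claim_changed_solution_codility : Prop := Dom_solution_codility (pvDiffWitness_solution_codility) ∧ D_solution_codility (pvDiffWitness_solution_codility) ∧ solution_codility (pvDiffWitness_solution_codility) = pvDiffWitnessOut_solution_codility.1 ∧ solution_codility_alt (pvDiffWitness_solution_codility) = pvDiffWitnessOut_solution_codility.2 ∧ pvDiffWitnessOut_solution_codility.1 ≠ pvDiffWitnessOut_solution_codility.2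
def Claim_exact_solution_codility : Prop := ∀ (T : List Int), Dom_solution_codility T → D_solution_codility T → solution_codility T ≠ solution_codility_alt T

-- ===== LEMMAS AND PROOFS =====

def pvInsOnes (m : PySem.Dict Int Int) (l : List (Int × Int)) : PySem.Dict Int Int :=
  l.foldl (fun m p => m.insert p.1 1) m

lemma pvLoop1_stop (h : Int) (D S : List (Int × Int)) (c : Int) (single mary : PySem.Dict Int Int)
    (hD : ∀ p ∈ D, 1 < p.2) (hne : D ≠ []) (hlen : c + (D.length : Int) = h) :
    pvLoop1 h (D ++ S) c single mary = (h, single, pvInsOnes mary D) := by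
  induction D generalizing c mary with
  | nil => exact absurd rfl hne
  | cons p rest ih =>
    obtain ⟨k, v⟩ := p
    have hv : 1 < v := hD (k, v) (by simp)
    simp only [List.cons_append, pvLoop1, if_pos hv]
    rcases rest with _ | ⟨q, rest'⟩
    · have : c + 1 = h := by simpa using hlen
      simp [this, pvInsOnes]
    · have hne' : c + 1 ≠ h := by
        simp only [List.length_cons] at hlen; push_cast at hlen ⊢; omega
      rw [if_neg hne']
      have := ih (fun p hp => hD p (by simp [hp])) (by simp) (c := c + 1) (mary := mary.insert k 1)
        (by simp only [List.length_cons] at hlen ⊢; push_cast at hlen ⊢; omega)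
      simpa [pvInsOnes] using this

lemma pvLoop1_go (h : Int) (D S : List (Int × Int)) (c : Int) (single mary : PySem.Dict Int Int)
    (hD : ∀ p ∈ D, 1 < p.2) (hlen : c + (D.length : Int) < h) :
    pvLoop1 h (D ++ S) c single mary = pvLoop1 h S (c + (D.length : Int)) single (pvInsOnes mary D) := by
  induction D generalizing c mary with
  | nil => simp [pvInsOnes]
  | cons p rest ih =>
    obtain ⟨k, v⟩ := p
    have hv : 1 < v := hD (k, v) (by simp)
    have hne' : c + 1 ≠ h := by
      simp only [List.length_cons] at hlen; push_cast at hlen; omega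
    simp only [List.cons_append, pvLoop1, if_pos hv, if_neg hne']
    have := ih (fun p hp => hD p (by simp [hp])) (c := c + 1) (mary := mary.insert k 1)
      (by simp only [List.length_cons] at hlen ⊢; push_cast at hlen ⊢; omega)
    rw [this]
    congr 1
    simp only [List.length_cons]
    push_cast
    ring

lemma pvLoop1_singles (h : Int) (S : List (Int × Int)) (c : Int) (single mary : PySem.Dict Int Int)
    (hS : ∀ p ∈ S, ¬ 1 < p.2) (hc : c ≠ h) :
    pvLoop1 h S c single mary = (c, S.foldl (fun d p => d.insert p.1 p.2) single, mary) := by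
  induction S generalizing single with
  | nil => simp [pvLoop1]
  | cons p rest ih =>
    obtain ⟨k, v⟩ := p
    have hv : ¬ 1 < v := hS (k, v) (by simp)
    simp only [pvLoop1, if_neg hv, if_neg hc]
    exact ih (fun p hp => hS p (by simp [hp])) (single := single.insert k v)

lemma pvLoop2_all (h : Int) (S : List (Int × Int)) (c : Int) (mary : PySem.Dict Int Int)
    (hlen : c + (S.length : Int) < h) :
    pvLoop2 h S c mary = pvInsOnes mary S := by
  induction S generalizing c mary with
  | nil => simp [pvLoop2, pvInsOnes]
  | cons p rest ih =>
    obtain ⟨k, v⟩ := p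
    have hne' : c + 1 ≠ h := by
      simp only [List.length_cons] at hlen; push_cast at hlen; omega
    simp only [pvLoop2, if_neg hne']
    have := ih (c := c + 1) (mary := mary.insert k 1)
      (by simp only [List.length_cons] at hlen ⊢; push_cast at hlen ⊢; omega)
    simpa [pvInsOnes] using this

lemma pvLoop2_cap (h : Int) (S : List (Int × Int)) (c : Int) (mary : PySem.Dict Int Int)
    (hc : c < h) (hlen : h ≤ c + (S.length : Int)) :
    pvLoop2 h S c mary = pvInsOnes mary (S.take (h - c).toNat) := by
  induction S generalizing c mary with
  | nil => simp at hlen; omega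
  | cons p rest ih =>
    obtain ⟨k, v⟩ := p
    by_cases he : c + 1 = h
    · have ht : (h - c).toNat = 1 := by omega
      simp [pvLoop2, if_pos he, ht, pvInsOnes]
    · have hc' : c + 1 < h := by omega
      simp only [pvLoop2, if_neg he]
      have := ih (c := c + 1) (mary := mary.insert k 1) hc'
        (by simp only [List.length_cons] at hlen ⊢; push_cast at hlen ⊢; omega)
      rw [this]
      have ht : (h - c).toNat = ((h - (c + 1)).toNat) + 1 := by omega
      simp [ht, pvInsOnes]

lemma pvDropWhile_le_one (M : List (Int × Int))
    (hp : M.Pairwise (fun a b => b.2 ≤ a.2)) :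
    ∀ p ∈ M.dropWhile (fun q => decide (1 < q.2)), ¬ 1 < p.2 := by
  induction M with
  | nil => simp
  | cons a t ih =>
    rw [List.pairwise_cons] at hp
    by_cases ha : 1 < a.2
    · rw [List.dropWhile_cons_of_pos (by simpa using ha)]
      exact ih hp.2
    · rw [List.dropWhile_cons_of_neg (by simpa using ha)]
      intro p hpmem
      rcases List.mem_cons.mp hpmem with rfl | h2
      · exact ha
      · have := hp.1 p h2
        omega

lemma pvSum_counts (T : List Int) :
    (((PySem.Set.ofList T).map (fun k => ((T.count k : Int)))).sum) = (T.length : Int) := by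
  have hperm : (PySem.Set.ofList T).Perm T.dedup := by
    apply List.perm_of_nodup_nodup_toFinset_eq (PySem.Set.nodup_ofList T) T.nodup_dedup
    ext x
    simp [PySem.Set.mem_ofList]
  calc ((PySem.Set.ofList T).map (fun k => ((T.count k : Int)))).sum
      = (T.dedup.map (fun k => ((T.count k : Int)))).sum := (hperm.map _).sum_eq
    _ = ((T.dedup.map (fun k => T.count k)).map (fun n : Nat => (n : Int))).sum := by
          rw [List.map_map]; rfl
    _ = (((T.dedup.map (fun k => T.count k)).sum : Nat) : Int) := by
          rw [Nat.cast_list_sum]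
    _ = (T.length : Int) := by rw [List.sum_map_count_dedup_eq_length]

lemma pvItems_empty : (PySem.Dict.empty : PySem.Dict Int Int).items = [] := rfl

lemma pvInsOnes_items (m : PySem.Dict Int Int) (l : List (Int × Int))
    (hfresh : ∀ p ∈ l, m.contains p.1 = false) (hnd : (l.map Prod.fst).Nodup) :
    (pvInsOnes m l).items = m.items ++ l.map (fun p => (p.1, (1 : Int))) := by
  exact PySem.Dict.items_foldl_insert_fresh l Prod.fst (fun _ => (1 : Int)) m hfresh hnd

lemma pvInsKV_items (l : List (Int × Int)) (hnd : (l.map Prod.fst).Nodup) :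
    (l.foldl (fun d p => d.insert p.1 p.2) (PySem.Dict.empty : PySem.Dict Int Int)).items = l := by
  rw [show (fun (d : PySem.Dict Int Int) (p : Int × Int) => d.insert p.1 p.2) =
        (fun (d : PySem.Dict Int Int) (p : Int × Int) => d.insert (Prod.fst p) (Prod.snd p)) from rfl,
      PySem.Dict.items_foldl_insert_fresh l Prod.fst Prod.snd PySem.Dict.empty
        (fun a _ => PySem.Dict.contains_empty a.1) hnd, pvItems_empty]
  simp

-- main equivalence for lists of length ≠ 1
theorem main_eq (T : List Int) (hT : T.length ≠ 1) :
    solution_codility T = solution_codility_alt T := by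
  rcases Nat.eq_zero_or_pos T.length with hn0 | hpos
  · have : T = [] := List.eq_nil_of_length_eq_zero hn0
    subst this; decide
  have hn2 : 2 ≤ T.length := by omega
  -- notation
  set n := T.length with hn
  set h2 := n / 2 with hh2
  have hh2pos : 1 ≤ h2 := by omega
  have hfd : PySem.Int.floordiv ((n : Nat) : Int) 2 = ((h2 : Nat) : Int) := by
    exact_mod_cast PySem.Int.floordiv_natCast n 2
  set L := (PySem.Set.ofList T).map (fun k => (k, (T.count k : Int))) with hL
  set M := PySem.List.sorted L (fun kv => kv.2) true with hM
  set Dp := M.takeWhile (fun q => decide (1 < q.2)) with hDp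
  set Sp := M.dropWhile (fun q => decide (1 < q.2)) with hSp
  have hDS : Dp ++ Sp = M := List.takeWhile_append_dropWhile
  have hMperm : M.Perm L := PySem.List.sorted_perm L (fun kv => kv.2) true
  have hLfst : L.map Prod.fst = PySem.Set.ofList T := by
    rw [hL, List.map_map]
    exact List.map_id' _
  have hkeys : (M.map Prod.fst).Nodup := by
    rw [(hMperm.map Prod.fst).nodup_iff, hLfst]
    exact PySem.Set.nodup_ofList T
  have hD : ∀ p ∈ Dp, 1 < p.2 := by
    intro p hp
    have := List.mem_takeWhile_imp hp
    simpa using this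
  have hpair : M.Pairwise (fun a b => b.2 ≤ a.2) :=
    PySem.List.sorted_pairwise_rev L (fun kv => kv.2)
  have hS : ∀ p ∈ Sp, ¬ 1 < p.2 := pvDropWhile_le_one M hpair
  have hposM : ∀ p ∈ M, 1 ≤ p.2 := by
    intro p hp
    have hpL : p ∈ L := hMperm.mem_iff.mp hp
    rw [hL] at hpL
    obtain ⟨k, hk, rfl⟩ := List.mem_map.mp hpL
    have hkT : k ∈ T := (PySem.Set.mem_ofList _ _).mp hk
    have : 0 < T.count k := List.count_pos_iff.mpr hkT
    simpa using this
  have hsum : (M.map (fun p => p.2)).sum = (n : Int) := by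
    rw [(hMperm.map (fun p => p.2)).sum_eq, hL, List.map_map]
    simpa using pvSum_counts T
  set d := Dp.length with hd
  set s := Sp.length with hs
  have hdistinct : (PySem.Set.ofList T).length = d + s := by
    have h1 : M.length = L.length := hMperm.length_eq
    have h2' : L.length = (PySem.Set.ofList T).length := by rw [hL, List.length_map]
    have h3 : M.length = d + s := by rw [← hDS, List.length_append]
    omega
  -- 2d + s ≤ n
  have hbound : 2 * d + s ≤ n := by
    have hsplit : (Dp.map (fun p => p.2)).sum + (Sp.map (fun p => p.2)).sum = (n : Int) := by
      rw [← hsum, ← hDS, List.map_append, List.sum_append]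
    have hDsum : 2 * (d : Int) ≤ (Dp.map (fun p => p.2)).sum := by
      calc 2 * (d : Int) = ((Dp.map (fun _ => (2 : Int))).sum) := by
            rw [PySem.List.sum_map_const_int]; ring
        _ ≤ (Dp.map (fun p => p.2)).sum := by
            apply List.sum_le_sum
            intro p hp
            have := hD p hp
            omega
    have hSsum : (Sp.map (fun p => p.2)).sum = (s : Int) := by
      have : Sp.map (fun p => p.2) = Sp.map (fun _ => (1 : Int)) := by
        apply List.map_congr_left
        intro p hp
        have h1 := hS p hp
        have h2' := hposM p (by rw [← hDS]; exact List.mem_append_right _ hp)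
        omega
      rw [this, PySem.List.sum_map_const_int]; ring
    have : 2 * (d : Int) + (s : Int) ≤ (n : Int) := by omega
    exact_mod_cast this
  have hdh : d ≤ h2 := by omega
  -- nodup pieces
  have hndDS : (Dp.map Prod.fst).Nodup ∧ (Sp.map Prod.fst).Nodup ∧
      (∀ a ∈ Dp.map Prod.fst, ∀ b ∈ Sp.map Prod.fst, a ≠ b) := by
    have := hkeys
    rw [← hDS, List.map_append, List.nodup_append] at this
    exact this
  have hitems : (PySem.Dict.counter T).items = L := by
    rw [hL]; exact PySem.Dict.items_counter T
  have hmaryKeys : (pvInsOnes PySem.Dict.empty Dp).keys = Dp.map Prod.fst := by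
    show (pvInsOnes PySem.Dict.empty Dp).items.map Prod.fst = Dp.map Prod.fst
    rw [pvInsOnes_items _ _ (fun a _ => PySem.Dict.contains_empty a.1) hndDS.1, pvItems_empty]
    simp [List.map_map]
  have hmaryItems : (pvInsOnes PySem.Dict.empty Dp).items = Dp.map (fun p => (p.1, (1 : Int))) := by
    rw [pvInsOnes_items _ _ (fun a _ => PySem.Dict.contains_empty a.1) hndDS.1, pvItems_empty]
    simp
  have hfreshS : ∀ q ∈ Sp, (pvInsOnes PySem.Dict.empty Dp).contains q.1 = false := by
    intro q hq
    rw [PySem.Dict.contains_eq_decide_mem_keys, hmaryKeys]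
    simp only [decide_eq_false_iff_not]
    intro hmem
    exact hndDS.2.2 q.1 hmem q.1 (List.mem_map_of_mem hq) rfl
  -- unfold both programs
  simp only [solution_codility, solution_codility_alt]
  rw [hfd, hitems, ← hM, hdistinct, ← hDS]
  rcases eq_or_lt_of_le hdh with hEq | hLt
  · -- d = h2 : break fires at the last duplicate
    have hDne : Dp ≠ [] := by
      intro hnil
      rw [hnil] at hd
      simp at hd
      omega
    rw [pvLoop1_stop _ Dp Sp 0 _ _ hD hDne (by rw [← hd, hEq]; ring)]
    show ((pvLoop2 _ (PySem.Dict.empty).items _ (pvInsOnes PySem.Dict.empty Dp)).size : Int) = _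
    have hempty : (PySem.Dict.empty : PySem.Dict Int Int).items = [] := rfl
    rw [hempty]
    show (((pvInsOnes PySem.Dict.empty Dp).size : Nat) : Int) = _
    have hsize : (pvInsOnes PySem.Dict.empty Dp).size = d := by
      show (pvInsOnes PySem.Dict.empty Dp).items.length = d
      rw [hmaryItems]
      simp [hd]
    rw [hsize]
    push_cast
    omega
  · -- d < h2 : all duplicates pass, then the singles
    rw [pvLoop1_go _ Dp Sp 0 _ _ hD (by rw [← hd]; omega),
        pvLoop1_singles _ Sp _ _ _ hS (by rw [← hd]; omega)]
    show ((pvLoop2 _ ((Sp.foldl (fun dd p => dd.insert p.1 p.2) PySem.Dict.empty).items) _ _).size : Int) = _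
    rw [pvInsKV_items Sp hndDS.2.1]
    rcases lt_or_ge (d + s) h2 with hlt2 | hge2
    · -- no break in loop 2 either: every distinct element lands in mary
      rw [pvLoop2_all _ Sp _ _ (by rw [← hd, ← hs]; push_cast; omega)]
      have hsize : (pvInsOnes (pvInsOnes PySem.Dict.empty Dp) Sp).size = d + s := by
        show (pvInsOnes (pvInsOnes PySem.Dict.empty Dp) Sp).items.length = d + s
        rw [pvInsOnes_items _ _ hfreshS hndDS.2.1, hmaryItems]
        simp [hd, hs]
      rw [hsize]
      push_cast
      omega
    · -- loop 2 breaks after h2 - d singles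
      rw [pvLoop2_cap _ Sp _ _ (by rw [← hd]; omega) (by rw [← hd, ← hs]; push_cast; omega)]
      have htake : ((h2 : Int) - (0 + (Dp.length : Int))).toNat = h2 - d := by
        rw [← hd]; omega
      rw [htake]
      have hfresh' : ∀ q ∈ Sp.take (h2 - d), (pvInsOnes PySem.Dict.empty Dp).contains q.1 = false :=
        fun q hq => hfreshS q (List.take_subset _ _ hq)
      have hnd' : ((Sp.take (h2 - d)).map Prod.fst).Nodup := by
        rw [List.map_take]
        exact hndDS.2.1.sublist (List.take_sublist _ _)
      have hsize : (pvInsOnes (pvInsOnes PySem.Dict.empty Dp) (Sp.take (h2 - d))).size = h2 := by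
        show (pvInsOnes (pvInsOnes PySem.Dict.empty Dp) (Sp.take (h2 - d))).items.length = h2
        rw [pvInsOnes_items _ _ hfresh' hnd', hmaryItems]
        simp only [List.length_append, List.length_map, List.length_take]
        rw [← hd, ← hs]
        omega
      rw [hsize]
      push_cast
      omega

theorem tight_eq (x : Int) : solution_codility [x] = 1 ∧ solution_codility_alt [x] = 0 := by
  have hof : PySem.Set.ofList [x] = [x] := by
    simp [PySem.Set.ofList, PySem.Set.add]
  constructor
  · have hitems : (PySem.Dict.counter [x]).items = [(x, 1)] := by
      rw [PySem.Dict.items_counter, hof]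
      simp
    have hsorted : PySem.List.sorted [(x, (1 : Int))] (fun kv => kv.2) true = [(x, 1)] :=
      PySem.List.sorted_rev_eq_self_of_pairwise _ _ (by simp)
    simp only [solution_codility, hitems, hsorted]
    have h0 : PySem.Int.floordiv (1 : Int) 2 = 0 := by decide
    have hins : ((PySem.Dict.empty : PySem.Dict Int Int).insert x 1).items = [(x, 1)] := by
      simp [PySem.Dict.items_insert, PySem.Dict.contains_empty, pvItems_empty]
    norm_num [pvLoop1, pvLoop2, h0, hins]
    rfl
  · simp [solution_codility_alt, hof, PySem.Int.floordiv]

-- ===== VERDICT (by name: the statement is the Claim_ definition above) =====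
theorem solution_codility_spec : Claim_unchanged_solution_codility := by
  intro T _ hnd
  exact main_eq T (by simpa [D_solution_codility] using hnd)

theorem solution_codility_changed : Claim_changed_solution_codility := by
  unfold Claim_changed_solution_codility; decide

theorem solution_codility_tight : Claim_exact_solution_codility := by
  intro T _ hDT
  obtain ⟨x, rfl⟩ := List.length_eq_one_iff.mp hDT
  obtain ⟨h1, h2⟩ := tight_eq x
  rw [h1, h2]
  decide
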